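-- pv_equiv track=rewrite | github.com/starostin13/Care | generate_hemisphere.py | reconstruct_coordinates
-- ===== SOURCE A (Python) =====
-- HEX_DIRECTIONS = [
--     (1, 0), (1, -1), (0, -1),
--     (-1, 0), (-1, 1), (0, 1)
-- ]
--
-- def hex_ring(cq, cr, radius):
--     if radius == 0:
--         return [(cq, cr)]
--     results = []
--     q = cq + HEX_DIRECTIONS[4][0] * radius
--     r = cr + HEX_DIRECTIONS[4][1] * radius
--     for i in range(6):
--         for _ in range(radius):
--             results.append((q, r))
--             dq, dr = HEX_DIRECTIONS[i]
--             q += dq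
--             r += dr
--     return results
--
-- def reconstruct_coordinates(total_hexes):
--     coords = {1: (0, 0)}
--     current_id = 2
--     radius = 1
--     while current_id <= total_hexes:
--         for q, r in hex_ring(0, 0, radius):
--             if current_id > total_hexes:
--                 break
--             coords[current_id] = (q, r)
--             current_id += 1
--         radius += 1
--         if radius > 50:
--             break
--     return coords
-- ===== SOURCE B (Python) =====
-- HEX_DIRECTIONS = [
--     (1, 0), (1, -1), (0, -1),
--     (-1, 0), (-1, 1), (0, 1)
-- ]
--
-- # prefix sums of HEX_DIRECTIONS: _PREFIX[i] = sum of HEX_DIRECTIONS[:i]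
-- _PREFIX = [(0, 0), (1, 0), (2, -1), (2, -2), (1, -2), (0, -1)]
--
-- def _ring(k):
--     # cell t of side i of ring k, by closed form: corner_i + t * dir_i,
--     # where corner_i = k * ((-1,1) + _PREFIX[i])
--     return [(-k + k * _PREFIX[i][0] + t * HEX_DIRECTIONS[i][0],
--              k + k * _PREFIX[i][1] + t * HEX_DIRECTIONS[i][1])
--             for i in range(6) for t in range(k)]
--
-- def reconstruct_coordinates(total_hexes):
--     positions = [(0, 0)]
--     for k in range(1, 51):
--         positions.extend(_ring(k))
--     n = min(total_hexes, len(positions))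
--     if n < 1:
--         n = 1
--     return {j + 1: positions[j] for j in range(n)}
-- ===== Notes on version B (the rewrite author's own statement) =====
-- stated objective: alternative
-- what changed: B precomputes the whole capped spiral once as a flat positions list (each ring cell by a closed-form corner + t*direction formula instead of A's incremental walk with an inner break) and then builds the dict in a single indexed pass over the first n positions, with n clamped between one and the spiral size.
import Mathlib
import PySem

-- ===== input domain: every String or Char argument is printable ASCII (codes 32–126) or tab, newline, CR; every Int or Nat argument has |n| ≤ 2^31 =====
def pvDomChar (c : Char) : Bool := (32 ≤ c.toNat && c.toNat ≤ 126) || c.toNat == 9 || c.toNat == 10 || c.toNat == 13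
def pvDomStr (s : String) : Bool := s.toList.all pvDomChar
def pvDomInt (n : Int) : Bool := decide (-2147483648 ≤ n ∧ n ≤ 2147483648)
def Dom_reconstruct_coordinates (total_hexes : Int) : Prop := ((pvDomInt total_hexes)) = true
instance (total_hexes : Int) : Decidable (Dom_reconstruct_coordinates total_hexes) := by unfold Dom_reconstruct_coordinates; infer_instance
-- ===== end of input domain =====

-- B precomputes the whole 50-ring spiral once (each ring cell by a closed-form corner+offset
-- formula instead of A's incremental walk) and then assigns ids 1..n in a single indexed pass;
-- objective: alternative decomposition.  The Python dict has strictly increasing fresh integer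
-- keys, so its association-list image is exact.

-- ===== PORT A =====
def HEX_DIRECTIONS : List (Int × Int) :=
  [(1, 0), (1, -1), (0, -1), (-1, 0), (-1, 1), (0, 1)]

-- hex_ring: the `for _ in range(radius)` body ignores the loop variable; append-then-step order kept.
def hex_ring (cq cr radius : Int) : List (Int × Int) :=
  if radius = 0 then [(cq, cr)]
  else
    let st := (PySem.List.pyRange 0 6 1).foldl
      (fun (st : List (Int × Int) × Int × Int) i =>
        (PySem.List.pyRange 0 radius 1).foldl
          (fun (st2 : List (Int × Int) × Int × Int) _ =>
            (st2.1 ++ [(st2.2.1, st2.2.2)],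
             st2.2.1 + (PySem.List.pyGetD HEX_DIRECTIONS i (0, 0)).1,
             st2.2.2 + (PySem.List.pyGetD HEX_DIRECTIONS i (0, 0)).2)) st)
      ([],
       cq + (PySem.List.pyGetD HEX_DIRECTIONS 4 (0, 0)).1 * radius,
       cr + (PySem.List.pyGetD HEX_DIRECTIONS 4 (0, 0)).2 * radius)
    st.1

-- A's while loop: it runs at most 50 times (the `radius > 50` break), so fuel 50 is exact and the
-- fuel-0 branch is unreachable; the inner `break` is ported as leave-state-unchanged, which is
-- exact because current_id never decreases, so the break condition persists for the rest of the ring.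
def reconLoop (total : Int) (coords : List (Int × Int × Int)) (cid radius : Int) :
    Nat → List (Int × Int × Int)
  | 0 => coords
  | fuel + 1 =>
    if total < cid then coords
    else
      let st := (hex_ring 0 0 radius).foldl
        (fun (st : List (Int × Int × Int) × Int) qr =>
          if total < st.2 then st
          else (st.1 ++ [(st.2, qr.1, qr.2)], st.2 + 1)) (coords, cid)
      if 50 < radius + 1 then st.1
      else reconLoop total st.1 st.2 (radius + 1) fuel

def reconstruct_coordinates (total_hexes : Int) : List (Int × Int × Int) :=
  reconLoop total_hexes [(1, 0, 0)] 2 1 50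

-- ===== PORT B =====
-- prefix sums of HEX_DIRECTIONS
def hexPrefix : List (Int × Int) :=
  [(0, 0), (1, 0), (2, -1), (2, -2), (1, -2), (0, -1)]

-- cell t of side i of ring k, by closed form: corner_i + t * dir_i
def ringB (k : Int) : List (Int × Int) :=
  (PySem.List.pyRange 0 6 1).flatMap (fun i =>
    (PySem.List.pyRange 0 k 1).map (fun t =>
      (-k + k * (PySem.List.pyGetD hexPrefix i (0, 0)).1
          + t * (PySem.List.pyGetD HEX_DIRECTIONS i (0, 0)).1,
       k + k * (PySem.List.pyGetD hexPrefix i (0, 0)).2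
          + t * (PySem.List.pyGetD HEX_DIRECTIONS i (0, 0)).2)))

def positionsB : List (Int × Int) :=
  (0, 0) :: (PySem.List.pyRange 1 51 1).flatMap ringB

def reconstruct_coordinates_alt (total_hexes : Int) : List (Int × Int × Int) :=
  let n0 := min total_hexes (positionsB.length : Int)
  let n := if n0 < 1 then 1 else n0
  (PySem.List.pyRange 0 n 1).map
    (fun j => (j + 1, PySem.List.pyGetD positionsB j (0, 0)))

-- ===== PRECONDITION & SPEC =====
def Spec_reconstruct_coordinates (total_hexes : Int) (out : List (Int × Int × Int)) : Prop := out = reconstruct_coordinates_alt total_hexes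
instance (total_hexes : Int) (out : List (Int × Int × Int)) : Decidable (Spec_reconstruct_coordinates total_hexes out) := by unfold Spec_reconstruct_coordinates; infer_instance

-- ===== CLAIM (what is proved, stated in full; the proofs are below) =====
def Claim_equal_reconstruct_coordinates : Prop := ∀ (total_hexes : Int), Dom_reconstruct_coordinates total_hexes → Spec_reconstruct_coordinates total_hexes (reconstruct_coordinates total_hexes)

-- ===== LEMMAS AND PROOFS =====

/-- ids `c, c+1, …` attached to a list of cells. -/
def enumFrom : Int → List (Int × Int) → List (Int × Int × Int)
  | _, [] => []
  | c, x :: xs => (c, x) :: enumFrom (c + 1) xs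

@[simp] theorem enumFrom_nil (c : Int) : enumFrom c [] = [] := rfl
@[simp] theorem enumFrom_cons (c : Int) (x : Int × Int) (xs : List (Int × Int)) :
    enumFrom c (x :: xs) = (c, x) :: enumFrom (c + 1) xs := rfl

theorem enumFrom_append (l1 l2 : List (Int × Int)) : ∀ c : Int,
    enumFrom c (l1 ++ l2) = enumFrom c l1 ++ enumFrom (c + l1.length) l2 := by
  induction l1 with
  | nil => intro c; simp [enumFrom]
  | cons x xs ih =>
    intro c
    simp only [List.cons_append, enumFrom_cons, ih (c + 1), List.length_cons]
    congr 2
    push_cast; ring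

/-- the cells of rings r..50 in order. -/
def cellsFrom (r : Nat) : List (Int × Int) :=
  (PySem.List.pyRange (r : Int) 51 1).flatMap ringB

/-- one side of the ring walk: the inner `for _ in range(radius)` fold. -/
theorem inner_walk (d : Int × Int) (l : List Int) : ∀ (res : List (Int × Int)) (q r : Int),
    l.foldl (fun (st2 : List (Int × Int) × Int × Int) _ =>
        (st2.1 ++ [(st2.2.1, st2.2.2)], st2.2.1 + d.1, st2.2.2 + d.2)) (res, q, r)
    = (res ++ (List.range l.length).map
          (fun t : Nat => (q + (t : Int) * d.1, r + (t : Int) * d.2)),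
       q + (l.length : Int) * d.1, r + (l.length : Int) * d.2) := by
  induction l with
  | nil => intro res q r; simp
  | cons a l ih =>
    intro res q r
    simp only [List.foldl_cons, ih, List.length_cons, List.range_succ_eq_map,
      List.map_cons, List.map_map, Prod.mk.injEq]
    refine ⟨?_, ?_, ?_⟩
    · rw [List.append_assoc, List.singleton_append]
      congr 1
      congr 1
      · norm_num
      · apply List.map_congr_left
        intro t _
        simp only [Function.comp_apply, Prod.mk.injEq]
        constructor <;> (push_cast; ring)
    · push_cast; ring
    · push_cast; ring

/-- A's walked ring equals B's closed-form ring, for positive radius. -/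
theorem hex_ring_eq_ringB (radius : Int) (h : 0 < radius) :
    hex_ring 0 0 radius = ringB radius := by
  have hne : ¬ radius = 0 := by omega
  have hlen : (PySem.List.pyRange 0 radius 1).length = radius.toNat := by
    simp [PySem.List.length_pyRange_one]
  have h6 : PySem.List.pyRange 0 6 1 = [0, 1, 2, 3, 4, 5] := by decide
  have key : ∀ (q0 r0 dq dr : Int),
      (List.range radius.toNat).map (fun t : Nat => (q0 + (t : Int) * dq, r0 + (t : Int) * dr))
      = (PySem.List.pyRange 0 radius 1).map (fun t => (q0 + t * dq, r0 + t * dr)) := by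
    intro q0 r0 dq dr
    rw [PySem.List.pyRange_one, List.map_map]
    have : (radius - 0).toNat = radius.toNat := by omega
    rw [this]
    apply List.map_congr_left
    intro t _
    simp
  unfold hex_ring ringB
  rw [if_neg hne, h6]
  simp only [List.foldl_cons, List.foldl_nil, List.flatMap_cons, List.flatMap_nil,
    List.append_nil]
  rw [inner_walk, inner_walk, inner_walk, inner_walk, inner_walk, inner_walk]
  simp only [hlen,
    show PySem.List.pyGetD HEX_DIRECTIONS 0 (0,0) = (1,0) from rfl,
    show PySem.List.pyGetD HEX_DIRECTIONS 1 (0,0) = (1,-1) from rfl,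
    show PySem.List.pyGetD HEX_DIRECTIONS 2 (0,0) = (0,-1) from rfl,
    show PySem.List.pyGetD HEX_DIRECTIONS 3 (0,0) = (-1,0) from rfl,
    show PySem.List.pyGetD HEX_DIRECTIONS 4 (0,0) = (-1,1) from rfl,
    show PySem.List.pyGetD HEX_DIRECTIONS 5 (0,0) = (0,1) from rfl,
    show PySem.List.pyGetD hexPrefix 0 (0,0) = (0,0) from rfl,
    show PySem.List.pyGetD hexPrefix 1 (0,0) = (1,0) from rfl,
    show PySem.List.pyGetD hexPrefix 2 (0,0) = (2,-1) from rfl,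
    show PySem.List.pyGetD hexPrefix 3 (0,0) = (2,-2) from rfl,
    show PySem.List.pyGetD hexPrefix 4 (0,0) = (1,-2) from rfl,
    show PySem.List.pyGetD hexPrefix 5 (0,0) = (0,-1) from rfl]
  have hcast : ((radius.toNat : Int)) = radius := Int.toNat_of_nonneg (by omega)
  simp only [hcast, List.nil_append, List.append_assoc]
  rw [key, key, key, key, key, key]
  congr 1
  · apply List.map_congr_left; intro t _; simp only [Prod.mk.injEq]; constructor <;> ring
  congr 1
  · apply List.map_congr_left; intro t _; simp only [Prod.mk.injEq]; constructor <;> ring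
  congr 1
  · apply List.map_congr_left; intro t _; simp only [Prod.mk.injEq]; constructor <;> ring
  congr 1
  · apply List.map_congr_left; intro t _; simp only [Prod.mk.injEq]; constructor <;> ring
  congr 1
  · apply List.map_congr_left; intro t _; simp only [Prod.mk.injEq]; constructor <;> ring
  · apply List.map_congr_left; intro t _; simp only [Prod.mk.injEq]; constructor <;> ring

/-- the inner for-loop with break over one ring. -/
theorem break_fold (total : Int) (ring : List (Int × Int)) :
    ∀ (coords : List (Int × Int × Int)) (cid : Int),
    ring.foldl (fun (st : List (Int × Int × Int) × Int) qr =>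
        if total < st.2 then st
        else (st.1 ++ [(st.2, qr.1, qr.2)], st.2 + 1)) (coords, cid)
    = (coords ++ enumFrom cid (ring.take (total - cid + 1).toNat),
       cid + ((ring.take (total - cid + 1).toNat).length : Int)) := by
  induction ring with
  | nil => intro coords cid; simp
  | cons x xs ih =>
    intro coords cid
    by_cases h : total < cid
    · have h0 : (total - cid + 1).toNat = 0 := by omega
      simp only [List.foldl_cons, if_pos h, h0, List.take_zero, enumFrom_nil, List.append_nil,
        List.length_nil, Nat.cast_zero, add_zero]
      simpa [h0] using ih coords cid
    · have h1 : (total - cid + 1).toNat = (total - (cid + 1) + 1).toNat + 1 := by omega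
      simp only [List.foldl_cons, if_neg h, h1, List.take_succ_cons, enumFrom_cons]
      rw [ih]
      simp only [List.length_cons, Prod.mk.injEq, List.append_assoc, List.singleton_append]
      exact ⟨by trivial, by push_cast; ring⟩

theorem cellsFrom_51 : cellsFrom 51 = [] := by
  simp [cellsFrom, PySem.List.pyRange_one_eq_nil]

theorem cellsFrom_succ (r : Nat) (h1 : 1 ≤ r) (h2 : r ≤ 50) :
    cellsFrom r = ringB r ++ cellsFrom (r + 1) := by
  unfold cellsFrom
  rw [PySem.List.pyRange_one_cons (by exact_mod_cast by omega)]
  simp [List.flatMap_cons]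

/-- splitting a truncated enumeration at a ring boundary. -/
theorem enumFrom_take_append (total : Int) (ring rest : List (Int × Int)) : ∀ (cid : Int),
    enumFrom cid ((ring ++ rest).take (total - cid + 1).toNat)
    = enumFrom cid (ring.take (total - cid + 1).toNat)
      ++ enumFrom (cid + ((ring.take (total - cid + 1).toNat).length : Int))
          (rest.take (total - (cid + ((ring.take (total - cid + 1).toNat).length : Int)) + 1).toNat) := by
  induction ring with
  | nil => intro cid; simp
  | cons x xs ih =>
    intro cid
    by_cases h : total < cid
    · have h0 : (total - cid + 1).toNat = 0 := by omega
      rw [h0]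
      simp only [List.take_zero, enumFrom_nil, List.length_nil, Nat.cast_zero, add_zero,
        List.nil_append]
      rw [h0, List.take_zero, enumFrom_nil]
    · have h1 : (total - cid + 1).toNat = (total - (cid + 1) + 1).toNat + 1 := by omega
      simp only [List.cons_append, h1, List.take_succ_cons, enumFrom_cons, List.length_cons]
      rw [ih (cid + 1)]
      have e1 : cid + 1 + ((List.take (total - (cid + 1) + 1).toNat xs).length : Int)
          = cid + (((List.take (total - (cid + 1) + 1).toNat xs).length + 1 : Nat) : Int) := by
        push_cast; ring
      rw [e1]

/-- the main loop produces the truncated enumeration of the remaining rings. -/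
theorem reconLoop_eq : ∀ (fuel r : Nat), 1 ≤ r → fuel + r = 51 →
    ∀ (coords : List (Int × Int × Int)) (cid total : Int),
    reconLoop total coords cid (r : Int) fuel
    = coords ++ enumFrom cid ((cellsFrom r).take (total - cid + 1).toNat) := by
  intro fuel
  induction fuel with
  | zero =>
    intro r h1 h2 coords cid total
    have : r = 51 := by omega
    subst this
    simp [reconLoop, cellsFrom_51]
  | succ f ih =>
    intro r h1 h2 coords cid total
    have hr50 : r ≤ 50 := by omega
    unfold reconLoop
    by_cases h : total < cid
    · rw [if_pos h]
      have h0 : (total - cid + 1).toNat = 0 := by omega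
      rw [h0, List.take_zero, enumFrom_nil, List.append_nil]
    · rw [if_neg h]
      have hring : hex_ring 0 0 (r : Int) = ringB r :=
        hex_ring_eq_ringB _ (by exact_mod_cast h1)
      simp only [hring, break_fold]
      rw [cellsFrom_succ r h1 hr50, enumFrom_take_append]
      by_cases hlast : (50 : Int) < (r : Int) + 1
      · rw [if_pos hlast]
        have : r = 50 := by omega
        subst this
        simp [cellsFrom_51]
      · rw [if_neg hlast]
        have hcast : ((r : Int) + 1) = ((r + 1 : Nat) : Int) := by push_cast; ring
        rw [hcast, ih (r + 1) (by omega) (by omega)]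
        simp [List.append_assoc]

/-- all spiral cells after the centre: rings 1..50. -/
def tailCells : List (Int × Int) := (PySem.List.pyRange 1 51 1).flatMap ringB

set_option maxRecDepth 40000 in
theorem tailCells_length : tailCells.length = 7650 := by decide

theorem positionsB_eq : positionsB = (0, 0) :: tailCells := rfl

theorem cellsFrom_one : cellsFrom 1 = tailCells := by
  unfold cellsFrom tailCells
  norm_num

/-- the indexed single pass equals the truncated enumeration. -/
theorem map_index_enum (xs : List (Int × Int)) : ∀ (k : Nat), k ≤ xs.length →
    (List.range k).map (fun j : Nat => ((j : Int) + 1, xs.getD j (0, 0)))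
    = enumFrom 1 (xs.take k) := by
  intro k
  induction k with
  | zero => intro _; simp
  | succ m ih =>
    intro hk
    have hm : m < xs.length := by omega
    rw [List.range_succ, List.map_append, ih (by omega)]
    rw [List.take_add_one, List.getElem?_eq_getElem hm]
    simp only [Option.toList_some]
    rw [enumFrom_append]
    congr 1
    have hmin : min m xs.length = m := by omega
    simp only [List.map_cons, List.map_nil, enumFrom_cons, enumFrom_nil, List.length_take, hmin,
      List.cons.injEq, Prod.mk.injEq, and_true]
    exact ⟨by ring, List.getD_eq_getElem _ _ hm⟩

-- ===== VERDICT (by name: the statement is the Claim_ definition above) =====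
theorem reconstruct_coordinates_spec : Claim_equal_reconstruct_coordinates := by
  unfold Claim_equal_reconstruct_coordinates Spec_reconstruct_coordinates
  intro total _
  have hposlen : positionsB.length = 7651 := by
    rw [positionsB_eq, List.length_cons, tailCells_length]
  have hA : reconstruct_coordinates total
      = [(1, 0, 0)] ++ enumFrom 2 ((cellsFrom 1).take (total - 2 + 1).toNat) := by
    unfold reconstruct_coordinates
    exact_mod_cast reconLoop_eq 50 1 (by omega) (by omega) [(1, 0, 0)] 2 total
  set n : Int := if min total (positionsB.length : Int) < 1 then 1
    else min total (positionsB.length : Int) with hn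
  have hn1 : 1 ≤ n := by rw [hn]; split <;> omega
  have hnlen : n ≤ (positionsB.length : Int) := by
    rw [hn, hposlen]; split <;> omega
  have hB : reconstruct_coordinates_alt total
      = enumFrom 1 (positionsB.take n.toNat) := by
    have hrfl : reconstruct_coordinates_alt total
        = (PySem.List.pyRange 0 n 1).map
            (fun j => (j + 1, PySem.List.pyGetD positionsB j (0, 0))) := rfl
    rw [hrfl, PySem.List.pyRange_one, List.map_map]
    have hsub : ((n - 0).toNat) = n.toNat := by omega
    rw [hsub, ← map_index_enum positionsB n.toNat (by omega)]
    apply List.map_congr_left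
    intro j hj
    simp
  rw [hA, hB, positionsB_eq, cellsFrom_one]
  rw [show n.toNat = (n.toNat - 1) + 1 from by omega, List.take_succ_cons, enumFrom_cons]
  simp only [List.singleton_append, List.cons.injEq, true_and]
  congr 1
  by_cases hle : total ≤ 1
  · have h1 : (total - 2 + 1).toNat = 0 := by omega
    have h2 : n.toNat - 1 = 0 := by
      rw [hn, hposlen] at *; split at hn1 <;> omega
    rw [h1, h2]
  · by_cases hbig : total ≤ 7651
    · have h2 : n = total := by rw [hn, hposlen]; split <;> omega
      have h3 : (total - 2 + 1).toNat = n.toNat - 1 := by omega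
      rw [h3]
    · have h2 : n = 7651 := by rw [hn, hposlen]; split <;> omega
      rw [List.take_of_length_le (by rw [tailCells_length]; omega),
          List.take_of_length_le (by rw [tailCells_length]; omega)]
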